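-- pv_equiv track=rewrite | github.com/carlosolmos/cipherlab | cryptography/common.py | decipher_substitution_with_nulls
-- ===== SOURCE A (Python) =====
-- def cipher_substitution(message: str, message_alphabet: list, cipher_alphabet: list):
--     output = ""
--     if len(message) == 0:
--         return output
--     message = message.lower()
--     for p in message:
--         if p in message_alphabet:
--             inx = message_alphabet.index(p)
--             output += cipher_alphabet[inx]
--         else:
--             output += p
--     return output
--
-- def decipher_substitution_with_nulls(message: str, cipher_alphabet: list, message_alphabet: list, nulls_set: list):
--     output = ""
--     if len(message) == 0:
--         return output
--     message = message.lower()
--     first_stage = cipher_substitution(message, cipher_alphabet, message_alphabet)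
--     for c in first_stage:
--         if c not in nulls_set:
--             output += c
--     return output
-- ===== SOURCE B (Python) =====
-- def decipher_substitution_with_nulls(message: str, cipher_alphabet: list, message_alphabet: list, nulls_set: list):
--     out = []
--     for ch in message.lower():
--         if ch in cipher_alphabet:
--             sub = message_alphabet[cipher_alphabet.index(ch)]
--         else:
--             sub = ch
--         out += [c for c in sub if c not in nulls_set]
--     return "".join(out)
-- ===== Notes on version B (the rewrite author's own statement) =====
-- stated objective: simpler
-- what changed: B fuses A's two passes (helper-built substituted string, then a separate null-filter loop) into one loop over the lowered message that substitutes each character and filters its substitution immediately, with no helper, no intermediate string and no double lowercasing.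
import Mathlib
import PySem

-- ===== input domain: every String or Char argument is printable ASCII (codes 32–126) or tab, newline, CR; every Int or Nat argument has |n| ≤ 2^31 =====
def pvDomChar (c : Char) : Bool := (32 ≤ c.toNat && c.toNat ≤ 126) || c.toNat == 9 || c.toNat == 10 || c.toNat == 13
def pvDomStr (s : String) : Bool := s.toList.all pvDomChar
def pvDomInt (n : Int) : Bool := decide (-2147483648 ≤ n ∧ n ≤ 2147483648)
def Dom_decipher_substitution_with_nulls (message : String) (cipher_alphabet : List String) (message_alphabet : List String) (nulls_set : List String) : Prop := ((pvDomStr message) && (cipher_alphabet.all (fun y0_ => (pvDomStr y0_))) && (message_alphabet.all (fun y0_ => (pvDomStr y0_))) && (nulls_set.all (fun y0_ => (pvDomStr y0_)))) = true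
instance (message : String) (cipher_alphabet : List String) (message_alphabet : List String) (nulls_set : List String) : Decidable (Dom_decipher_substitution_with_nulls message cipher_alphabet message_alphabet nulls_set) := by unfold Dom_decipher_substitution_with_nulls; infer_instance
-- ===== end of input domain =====

-- B fuses A's two passes (helper substitution pass, then null-filter pass) into one loop; equivalence is proved on Pre_, which excludes the inputs where both Pythons raise IndexError.

-- ===== PORT A =====
-- helper: cipher_substitution from Source A; 'none' = the IndexError of cipher_alphabet[inx]
def pvCipherSub (message : String) (message_alphabet : List String) (cipher_alphabet : List String) : Option String :=
  if message.length = 0 then some "" else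
    (PySem.Str.lower message).toList.foldl
      (fun acc p => acc.bind (fun out =>
        if String.ofList [p] ∈ message_alphabet then
          (PySem.List.index? message_alphabet (String.ofList [p])).bind (fun inx =>
            (PySem.List.pyGet? cipher_alphabet (inx : Int)).map (fun r => out ++ r))
        else some (out ++ String.ofList [p]))) (some "")

def decipher_substitution_with_nulls (message : String) (cipher_alphabet : List String) (message_alphabet : List String) (nulls_set : List String) : String :=
  if message.length = 0 then "" else
    match pvCipherSub (PySem.Str.lower message) cipher_alphabet message_alphabet with
    | none => ""   -- A raises IndexError here; excluded by Pre_
    | some first_stage =>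
      first_stage.toList.foldl
        (fun out c => if String.ofList [c] ∈ nulls_set then out else out ++ String.ofList [c]) ""

-- ===== PORT B =====
def decipher_substitution_with_nulls_alt (message : String) (cipher_alphabet : List String) (message_alphabet : List String) (nulls_set : List String) : String :=
  String.ofList <|
    (PySem.Str.lower message).toList.foldl
      (fun out ch =>
        out ++
          (if String.ofList [ch] ∈ cipher_alphabet then
              (PySem.List.pyGet? message_alphabet
                (((PySem.List.index? cipher_alphabet (String.ofList [ch])).getD 0 : Nat) : Int)).getD
                (String.ofList [ch])
            else String.ofList [ch]).toList.filter (fun c => !decide (String.ofList [c] ∈ nulls_set))) []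

-- ===== PRECONDITION & SPEC =====
-- Pre_ excludes exactly the inputs where both Pythons raise IndexError: some lowered
-- character of the message occurs in cipher_alphabet at an index beyond message_alphabet.
def Pre_decipher_substitution_with_nulls (message : String) (cipher_alphabet : List String) (message_alphabet : List String) (nulls_set : List String) : Prop :=
  ((PySem.Str.lower message).toList.all (fun c =>
      !decide (String.ofList [c] ∈ cipher_alphabet) ||
        decide ((PySem.List.index? cipher_alphabet (String.ofList [c])).getD 0 < message_alphabet.length))) = true
instance (message : String) (cipher_alphabet : List String) (message_alphabet : List String) (nulls_set : List String) : Decidable (Pre_decipher_substitution_with_nulls message cipher_alphabet message_alphabet nulls_set) := by unfold Pre_decipher_substitution_with_nulls; infer_instance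

def pvWitness_decipher_substitution_with_nulls : String × List String × List String × List String :=
  ("Ab cX", ["a", "b"], ["x", "yz"], ["z", " "])

def Spec_decipher_substitution_with_nulls (message : String) (cipher_alphabet : List String) (message_alphabet : List String) (nulls_set : List String) (out : String) : Prop := out = decipher_substitution_with_nulls_alt message cipher_alphabet message_alphabet nulls_set
instance (message : String) (cipher_alphabet : List String) (message_alphabet : List String) (nulls_set : List String) (out : String) : Decidable (Spec_decipher_substitution_with_nulls message cipher_alphabet message_alphabet nulls_set out) := by unfold Spec_decipher_substitution_with_nulls; infer_instance

-- ===== CLAIM (what is proved, stated in full; the proofs are below) =====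
def Claim_equal_decipher_substitution_with_nulls : Prop := ∀ (message : String) (cipher_alphabet : List String) (message_alphabet : List String) (nulls_set : List String), Dom_decipher_substitution_with_nulls message cipher_alphabet message_alphabet nulls_set → Pre_decipher_substitution_with_nulls message cipher_alphabet message_alphabet nulls_set → Spec_decipher_substitution_with_nulls message cipher_alphabet message_alphabet nulls_set (decipher_substitution_with_nulls message cipher_alphabet message_alphabet nulls_set)

-- ===== LEMMAS AND PROOFS =====

theorem pv_witness_ok : Dom_decipher_substitution_with_nulls (pvWitness_decipher_substitution_with_nulls.1) (pvWitness_decipher_substitution_with_nulls.2.1) (pvWitness_decipher_substitution_with_nulls.2.2.1) (pvWitness_decipher_substitution_with_nulls.2.2.2) ∧ Pre_decipher_substitution_with_nulls (pvWitness_decipher_substitution_with_nulls.1) (pvWitness_decipher_substitution_with_nulls.2.1) (pvWitness_decipher_substitution_with_nulls.2.2.1) (pvWitness_decipher_substitution_with_nulls.2.2.2) := by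
  constructor <;> decide

def pvKeep (nulls_set : List String) (c : Char) : Bool := !decide (String.ofList [c] ∈ nulls_set)

def pvSub (cipher_alphabet : List String) (message_alphabet : List String) (ch : Char) : List Char :=
  (if String.ofList [ch] ∈ cipher_alphabet then
      (PySem.List.pyGet? message_alphabet
        (((PySem.List.index? cipher_alphabet (String.ofList [ch])).getD 0 : Nat) : Int)).getD (String.ofList [ch])
    else String.ofList [ch]).toList

theorem lowerChar_idem (c : Char) : PySem.Chars.lowerChar (PySem.Chars.lowerChar c) = PySem.Chars.lowerChar c := by
  unfold PySem.Chars.lowerChar PySem.Chars.isupper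
  split_ifs with h1 h2 <;> try rfl
  exfalso
  simp only [Bool.and_eq_true, decide_eq_true_eq] at h1 h2
  have h65 : (65 : Nat) ≤ c.toNat := by
    have := h1.1; rw [Char.le_def, UInt32.le_iff_toNat_le] at this; exact this
  have hle : c.toNat ≤ 90 := by
    have := h1.2; rw [Char.le_def, UInt32.le_iff_toNat_le] at this; exact this
  have hv : (c.toNat + 32).isValidChar := Or.inl (by omega)
  have hof : (Char.ofNat (c.toNat + 32)).val.toNat = c.toNat + 32 := by
    have : (Char.ofNat (c.toNat + 32)).toNat = c.toNat + 32 := by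
      rw [Char.toNat_ofNat]; simp [hv]
    exact this
  have := h2.2
  rw [Char.le_def, UInt32.le_iff_toNat_le] at this
  rw [hof] at this
  change _ ≤ (90 : Nat) at this
  omega

theorem chars_lower_idem (l : List Char) :
    PySem.Chars.lower (PySem.Chars.lower l) = PySem.Chars.lower l := by
  show (l.map PySem.Chars.lowerChar).map PySem.Chars.lowerChar = l.map PySem.Chars.lowerChar
  rw [List.map_map]
  exact List.map_congr_left (fun c _ => lowerChar_idem c)

-- B's port as a flatMap of filtered substitutions
theorem altB_eq (message : String) (cipher_alphabet message_alphabet nulls_set : List String) :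
    decipher_substitution_with_nulls_alt message cipher_alphabet message_alphabet nulls_set =
      String.ofList ((PySem.Str.lower message).toList.flatMap
        (fun ch => (pvSub cipher_alphabet message_alphabet ch).filter (pvKeep nulls_set))) := by
  unfold decipher_substitution_with_nulls_alt pvSub pvKeep
  rw [PySem.List.foldl_append_eq_flatMap]
  rw [List.nil_append]

-- A's null-filter loop
theorem filter_fold_eq (nulls_set : List String) (l : List Char) (acc : String) :
    l.foldl (fun out c => if String.ofList [c] ∈ nulls_set then out else out ++ String.ofList [c]) acc =
      acc ++ String.ofList (l.filter (pvKeep nulls_set)) := by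
  induction l generalizing acc with
  | nil => simp
  | cons c l ih =>
    simp only [List.foldl_cons, List.filter_cons, pvKeep]
    by_cases h : String.ofList [c] ∈ nulls_set
    · simp [h, ih]
    · rw [if_neg h, ih]
      simp [h, String.append_assoc, ← String.ofList_append]

-- the loop of cipher_substitution, characterised under the no-IndexError hypothesis
theorem cipher_fold_eq (sa ra : List String) (l : List Char) (acc : String)
    (h : ∀ c ∈ l, String.ofList [c] ∈ sa →
      (PySem.List.index? sa (String.ofList [c])).getD 0 < ra.length) :
    l.foldl
      (fun acc p => acc.bind (fun out =>
        if String.ofList [p] ∈ sa then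
          (PySem.List.index? sa (String.ofList [p])).bind (fun inx =>
            (PySem.List.pyGet? ra (inx : Int)).map (fun r => out ++ r))
        else some (out ++ String.ofList [p]))) (some acc) =
      some (acc ++ String.ofList (l.flatMap (pvSub sa ra))) := by
  induction l generalizing acc with
  | nil => simp
  | cons c l ih =>
    simp only [List.foldl_cons, List.flatMap_cons, Option.bind_some]
    by_cases hm : String.ofList [c] ∈ sa
    · obtain ⟨inx, hidx⟩ := Option.isSome_iff_exists.mp
        ((PySem.List.index?_isSome_iff sa (String.ofList [c])).mpr hm)
      have hlt : inx < ra.length := by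
        have := h c List.mem_cons_self hm
        rwa [hidx, Option.getD_some] at this
      have hget : PySem.List.pyGet? ra (inx : Int) = some ra[inx] := by
        rw [PySem.List.pyGet?_natCast]
        exact List.getElem?_eq_getElem hlt
      have hsub : pvSub sa ra c = ra[inx].toList := by
        unfold pvSub
        rw [if_pos hm, hidx, Option.getD_some, hget, Option.getD_some]
      rw [if_pos hm, hidx, Option.bind_some, hget, Option.map_some,
        ih (acc ++ ra[inx]) (fun c hc => h c (List.mem_cons_of_mem _ hc)), hsub]
      simp [String.append_assoc, String.ofList_append]
    · have hsub : pvSub sa ra c = [c] := by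
        unfold pvSub
        rw [if_neg hm]
        simp
      rw [if_neg hm, ih (acc ++ String.ofList [c]) (fun c hc => h c (List.mem_cons_of_mem _ hc)), hsub]
      simp [String.append_assoc, ← String.ofList_append]

-- ===== VERDICT (by name: the statement is the Claim_ definition above) =====
theorem decipher_substitution_with_nulls_spec : Claim_equal_decipher_substitution_with_nulls := by
  intro message cipher_alphabet message_alphabet nulls_set _hdom hpre
  unfold Spec_decipher_substitution_with_nulls
  unfold decipher_substitution_with_nulls
  rw [altB_eq]
  by_cases h0 : message.length = 0
  · have hnil : message.toList = [] := by
      have := String.length_toList (s := message)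
      exact List.eq_nil_of_length_eq_zero (by omega)
    rw [if_pos h0]
    simp [PySem.Str.toList_lower, hnil, PySem.Chars.lower]
  · rw [if_neg h0]
    have hL : (PySem.Str.lower (PySem.Str.lower message)).toList = (PySem.Str.lower message).toList := by
      rw [PySem.Str.toList_lower, PySem.Str.toList_lower, chars_lower_idem]
    have hlen : ¬ (PySem.Str.lower message).length = 0 := by
      rw [← String.length_toList, PySem.Str.toList_lower]
      show ¬ (message.toList.map PySem.Chars.lowerChar).length = 0
      rw [List.length_map, ← String.length_toList] at *
      omega
    have hchar : pvCipherSub (PySem.Str.lower message) cipher_alphabet message_alphabet =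
        some ("" ++ String.ofList ((PySem.Str.lower message).toList.flatMap
          (pvSub cipher_alphabet message_alphabet))) := by
      unfold pvCipherSub
      rw [if_neg hlen, hL]
      refine cipher_fold_eq cipher_alphabet message_alphabet _ "" ?_
      intro c hc hm
      have := List.all_eq_true.mp hpre c hc
      simpa [hm] using this
    rw [hchar]
    show List.foldl _ "" _ = _
    rw [filter_fold_eq]
    simp [List.filter_flatMap]
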